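-- pv_equiv track=rewrite | github.com/Dicoangelo/meta-vengine | supermemory/core/unified_index.py | _parse_daily_log
-- ===== SOURCE A (Python) =====
-- def _parse_daily_log(content: str) -> dict:
--     """Parse daily log into sections."""
--     sections = {}
--     current_section = 'header'
--     current_content = []
--
--     for line in content.split('\n'):
--         if line.startswith('## '):
--             # Save previous section
--             if current_content:
--                 sections[current_section] = '\n'.join(current_content)
--             current_section = line[3:].strip().lower().replace(' ', '_')
--             current_content = []
--         else:
--             current_content.append(line)
--
--     # Save last section
--     if current_content:
--         sections[current_section] = '\n'.join(current_content)
--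
--     return sections
-- ===== SOURCE B (Python) =====
-- def _parse_daily_log(content: str) -> dict:
--     """Parse daily log into sections by jumping from header to header over an index range."""
--     lines = content.split('\n')
--     n = len(lines)
--     sections = {}
--     name = 'header'
--     i = 0
--     while True:
--         # find the next '## ' header at or after i
--         k = i
--         while k < n and not lines[k].startswith('## '):
--             k += 1
--         if k > i:
--             sections[name] = '\n'.join(lines[i:k])
--         if k == n:
--             return sections
--         name = lines[k][3:].strip().lower().replace(' ', '_')
--         i = k + 1
-- ===== Notes on version B (the rewrite author's own statement) =====
-- stated objective: alternative
-- what changed: Replaced A's line-by-line flush-on-header fold (running buffer + dict mutation inside one for-loop) with an index-jumping block scanner: an outer loop that finds the next '## ' header position k, emits lines[i:k] as one slice if non-empty, and restarts after the header; no running line buffer exists.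
import Mathlib
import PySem

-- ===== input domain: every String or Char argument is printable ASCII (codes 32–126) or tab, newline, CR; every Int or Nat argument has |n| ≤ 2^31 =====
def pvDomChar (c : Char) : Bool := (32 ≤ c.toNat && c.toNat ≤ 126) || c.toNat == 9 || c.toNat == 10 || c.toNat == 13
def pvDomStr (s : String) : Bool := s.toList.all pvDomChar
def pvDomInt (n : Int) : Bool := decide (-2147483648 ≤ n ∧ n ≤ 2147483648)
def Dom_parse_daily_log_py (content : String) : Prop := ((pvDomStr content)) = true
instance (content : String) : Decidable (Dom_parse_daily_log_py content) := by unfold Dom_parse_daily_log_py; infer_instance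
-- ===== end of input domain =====

-- B replaces A's line-by-line flush-on-header loop by an index-jumping block scanner
-- (find next header position, emit one slice per block); objective: alternative, same cost.

-- section name computed from a '## ' header line (same expression in both Pythons)
def pdlName (line : String) : String :=
  PySem.Str.replace (PySem.Str.lower (PySem.Str.strip (PySem.Str.slice line (some 3) none))) " " "_"

-- ===== PORT A =====
-- 'if current_content: sections[current_section] = "\n".join(current_content)'
def pdlFlush (d : PySem.Dict String String) (name : String) (buf : List String) :
    PySem.Dict String String :=
  if buf = [] then d else d.insert name (PySem.Str.join "\n" buf)

def pdlStepA (st : PySem.Dict String String × String × List String) (line : String) :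
    PySem.Dict String String × String × List String :=
  if PySem.Str.startswith line "## " then
    (pdlFlush st.1 st.2.1 st.2.2, pdlName line, [])
  else
    (st.1, st.2.1, st.2.2 ++ [line])

def parse_daily_log_py (content : String) : List (String × String) :=
  let st := ((PySem.Str.split? content "\n").getD []).foldl pdlStepA (PySem.Dict.empty, "header", [])
  (pdlFlush st.1 st.2.1 st.2.2).items

-- ===== PORT B =====
-- inner 'while k < n and not lines[k].startswith("## "): k += 1'
def pdlFind (lines : List String) (k : Nat) : Nat :=
  if h : k < lines.length ∧ PySem.Str.startswith (PySem.List.pyGetD lines (k : Int) "") "## " = false then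
    pdlFind lines (k + 1)
  else k
termination_by lines.length - k
decreasing_by omega

-- needed for pdlLoop's termination: the inner search never moves left
theorem pdlFind_ge (lines : List String) (k : Nat) : k ≤ pdlFind lines k := by
  refine pdlFind.induct lines (fun k => k ≤ pdlFind lines k) ?_ ?_ k
  · intro k h ih; rw [pdlFind, dif_pos h]; omega
  · intro k h; rw [pdlFind, dif_neg h]

-- outer 'while True' loop of B (state: sections dict d, current name, start index i);
-- the Python exit test 'k == n' is written 'n ≤ k' (equal under the loop invariant i ≤ n,
-- and making the recursion total for every i)
def pdlLoop (lines : List String) (d : PySem.Dict String String) (name : String) (i : Nat) :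
    PySem.Dict String String :=
  let k := pdlFind lines i
  let d' := if i < k then
      d.insert name (PySem.Str.join "\n" (PySem.List.slice lines (some (i : Int)) (some (k : Int))))
    else d
  if hk : lines.length ≤ k then d'
  else pdlLoop lines d' (pdlName (PySem.List.pyGetD lines (k : Int) "")) (k + 1)
termination_by lines.length - i
decreasing_by have := pdlFind_ge lines i; omega

def parse_daily_log_py_alt (content : String) : List (String × String) :=
  (pdlLoop ((PySem.Str.split? content "\n").getD []) PySem.Dict.empty "header" 0).items

-- ===== PRECONDITION & SPEC =====
def Spec_parse_daily_log_py (content : String) (out : List (String × String)) : Prop := out = parse_daily_log_py_alt content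
instance (content : String) (out : List (String × String)) : Decidable (Spec_parse_daily_log_py content out) := by unfold Spec_parse_daily_log_py; infer_instance

-- ===== CLAIM (what is proved, stated in full; the proofs are below) =====
def Claim_equal_parse_daily_log_py : Prop := ∀ (content : String), Dom_parse_daily_log_py content → Spec_parse_daily_log_py content (parse_daily_log_py content)

-- ===== LEMMAS AND PROOFS =====

theorem pdlFind_eq_of_ge (lines : List String) (k : Nat) (h : lines.length ≤ k) :
    pdlFind lines k = k := by
  rw [pdlFind, dif_neg]; omega

theorem pdlFind_header (lines : List String) (k : Nat)
    (h : pdlFind lines k < lines.length) :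
    PySem.Str.startswith (PySem.List.pyGetD lines ((pdlFind lines k : Nat) : Int) "") "## " = true := by
  refine pdlFind.induct lines (fun k => pdlFind lines k < lines.length →
      PySem.Str.startswith (PySem.List.pyGetD lines ((pdlFind lines k : Nat) : Int) "") "## " = true) ?_ ?_ k h
  · intro k hc ih h; rw [pdlFind, dif_pos hc] at h ⊢; exact ih h
  · intro k hc h
    rw [pdlFind, dif_neg hc] at h ⊢
    rcases Bool.eq_false_or_eq_true (PySem.Str.startswith (PySem.List.pyGetD lines (k : Int) "") "## ") with ht | hf
    · exact ht
    · exact absurd ⟨h, hf⟩ hc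

-- A's fold consumes the header-free stretch found by pdlFind by just appending it to the buffer
theorem pdl_skip (lines : List String) (i : Nat) :
    ∀ (d : PySem.Dict String String) (name : String) (buf : List String),
    (lines.drop i).foldl pdlStepA (d, name, buf)
      = (lines.drop (pdlFind lines i)).foldl pdlStepA
          (d, name, buf ++ (lines.drop i).take (pdlFind lines i - i)) := by
  refine pdlFind.induct lines (fun i => ∀ (d : PySem.Dict String String) (name : String)
      (buf : List String), (lines.drop i).foldl pdlStepA (d, name, buf)
        = (lines.drop (pdlFind lines i)).foldl pdlStepA
            (d, name, buf ++ (lines.drop i).take (pdlFind lines i - i))) ?_ ?_ i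
  · intro i hc ih d name buf
    obtain ⟨hlt, hns⟩ := hc
    have hget : PySem.List.pyGetD lines ((i : Nat) : Int) "" = lines[i] := by
      simp [PySem.List.pyGetD_natCast, List.getD_eq_getElem?_getD, List.getElem?_eq_getElem hlt]
    have hdrop : lines.drop i = lines[i] :: lines.drop (i + 1) :=
      List.drop_eq_getElem_cons hlt
    rw [pdlFind, dif_pos ⟨hlt, hns⟩]
    rw [hdrop, List.foldl_cons]
    have hns' : PySem.Str.startswith lines[i] "## " = false := hget ▸ hns
    have hstep : pdlStepA (d, name, buf) lines[i] = (d, name, buf ++ [lines[i]]) := by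
      unfold pdlStepA; rw [hns']; simp
    rw [hstep, ih d name (buf ++ [lines[i]])]
    have hge : i + 1 ≤ pdlFind lines (i + 1) := pdlFind_ge lines (i + 1)
    have htake : (lines[i] :: lines.drop (i + 1)).take (pdlFind lines (i + 1) - i)
        = lines[i] :: (lines.drop (i + 1)).take (pdlFind lines (i + 1) - (i + 1)) := by
      have : pdlFind lines (i + 1) - i = (pdlFind lines (i + 1) - (i + 1)) + 1 := by omega
      rw [this, List.take_succ_cons]
    rw [htake]
    simp
  · intro i hc d name buf
    rw [pdlFind, dif_neg hc]
    simp

-- main invariant: A's flush-as-you-go fold over the remaining lines equals B's block scanner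
theorem pdl_loop_eq (lines : List String) :
    ∀ (n i : Nat) (d : PySem.Dict String String) (name : String), lines.length - i ≤ n →
    (let st := (lines.drop i).foldl pdlStepA (d, name, []); pdlFlush st.1 st.2.1 st.2.2)
      = pdlLoop lines d name i := by
  intro n
  induction n with
  | zero =>
    intro i d name h
    have hi : lines.length ≤ i := by omega
    have hk : pdlFind lines i = i := pdlFind_eq_of_ge lines i hi
    rw [pdlLoop]
    simp [hk, hi, List.drop_eq_nil_of_le hi, pdlFlush]
  | succ n ih =>
    intro i d name h
    simp only
    rw [pdl_skip lines i d name []]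
    set k := pdlFind lines i with hkdef
    have hge : i ≤ k := pdlFind_ge lines i
    have hself : lines.length ≤ i → k = i := fun hi => pdlFind_eq_of_ge lines i hi
    have hbody : (lines.drop i).take (k - i) =
        PySem.List.slice lines (some (i : Int)) (some (k : Int)) :=
      (PySem.List.slice_natCast lines i k).symm
    have hbody_nil : i < k → (lines.drop i).take (k - i) ≠ [] := by
      intro hik hnil
      have hil : i < lines.length := by
        by_contra hge'
        have := hself (by omega); omega
      rw [List.take_eq_nil_iff] at hnil
      rcases hnil with h0 | hdn
      · omega
      · rw [List.drop_eq_nil_iff] at hdn; omega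
    by_cases hk : lines.length ≤ k
    · -- no further header: last flush vs B's final emit
      rw [pdlLoop, dif_pos hk]
      rw [List.drop_eq_nil_of_le hk, List.foldl_nil]
      simp only [List.nil_append, pdlFlush]
      by_cases hik : i < k
      · rw [if_neg (hbody_nil hik), if_pos hik, hbody]
      · have : (lines.drop i).take (k - i) = [] := by
          have : k = i := by omega
          simp [this]
        rw [if_pos this, if_neg hik]
    · -- header at position k: A flushes and continues, B recurses
      rw [not_le] at hk
      have hhdr := pdlFind_header lines i (hkdef ▸ hk)
      rw [← hkdef] at hhdr
      have hdropk : lines.drop k = lines[k] :: lines.drop (k + 1) :=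
        List.drop_eq_getElem_cons hk
      have hget : PySem.List.pyGetD lines ((k : Nat) : Int) "" = lines[k] := by
        simp [PySem.List.pyGetD_natCast, List.getD_eq_getElem?_getD, List.getElem?_eq_getElem hk]
      rw [hdropk, List.foldl_cons]
      simp only [List.nil_append]
      have hstep : pdlStepA (d, name, (lines.drop i).take (k - i)) lines[k]
          = (pdlFlush d name ((lines.drop i).take (k - i)), pdlName lines[k], []) := by
        have hhdr' : PySem.Str.startswith lines[k] "## " = true := hget ▸ hhdr
        unfold pdlStepA; rw [hhdr']; simp
      rw [hstep]
      rw [ih (k + 1) (pdlFlush d name ((lines.drop i).take (k - i))) (pdlName lines[k]) (by omega)]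
      have hd' : (if i < k then
            d.insert name (PySem.Str.join "\n" (PySem.List.slice lines (some (i : Int)) (some (k : Int))))
          else d) = pdlFlush d name ((lines.drop i).take (k - i)) := by
        unfold pdlFlush
        by_cases hik : i < k
        · rw [if_pos hik, if_neg (hbody_nil hik), hbody]
        · have hnil : (lines.drop i).take (k - i) = [] := by
            have : k = i := by omega
            simp [this]
          rw [if_neg hik, if_pos hnil]
      conv_rhs => rw [pdlLoop]
      simp only [← hkdef]
      rw [dif_neg (show ¬ lines.length ≤ k by omega), hd', hget]

-- ===== VERDICT (by name: the statement is the Claim_ definition above) =====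
theorem parse_daily_log_py_spec : Claim_equal_parse_daily_log_py := by
  intro content _
  unfold Spec_parse_daily_log_py parse_daily_log_py parse_daily_log_py_alt
  have h := pdl_loop_eq ((PySem.Str.split? content "\n").getD [])
      (((PySem.Str.split? content "\n").getD []).length) 0 PySem.Dict.empty "header" (by omega)
  simpa using congrArg PySem.Dict.items h
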